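-- pv_equiv track=rewrite | github.com/lpfahler/Pico_Projects | stb.py | rollCheck
-- ===== SOURCE A (Python) =====
-- def rollCheck(rollTotal, availNums):
--     # reduce availNums to all numbers <= dieTotal
--     availNums = [x for x in availNums if x <= rollTotal]
--     # create a variable for the length of availNums
--     numsLen = len(availNums)
--     # first check to see if a single number in availNums will work
--     if rollTotal in availNums:
--         return True
--     # check sums of pairs of numbers in availNums if numsLen >= 2
--     if numsLen >= 2:
--         for index1 in range(numsLen):
--             for index2 in range(index1 + 1, numsLen):
--                 if sum([availNums[index1], availNums[index2]]) == rollTotal: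
--                     return True
--     # check sums of three of numbers in availNums if numsLen >= 3
--     if numsLen >= 3:
--         for index1 in range(numsLen):
--             for index2 in range(index1 + 1, numsLen):
--                 for index3 in range(index2 + 1, numsLen):
--                     if sum([availNums[index1], availNums[index2],
--                            availNums[index3]]) == rollTotal:
--                         return True
--     # Only one combination of four numbers is less than the max roll of 12
--     # 1+2+3+4 = 10, check just this case
--     if rollTotal == 10 and all(x in availNums for x in [1, 2, 3, 4]):
--         return True
--     # return False if none of the single numbers or possible sums from availNums will work
--     return False
-- ===== SOURCE B (Python) =====
-- def rollCheck(rollTotal, availNums):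
--     # O(n^2): two-sum with a seen-set instead of A's O(n^3) nested index loops
--     nums = [x for x in availNums if x <= rollTotal]
--     if rollTotal in set(nums):
--         return True
--     # pairs: one pass with a seen-set
--     seen = set()
--     for x in nums:
--         if rollTotal - x in seen:
--             return True
--         seen.add(x)
--     # triples: fix the first element, two-sum over the suffix
--     for i in range(len(nums)):
--         target = rollTotal - nums[i]
--         seen = set()
--         for y in nums[i + 1:]:
--             if target - y in seen:
--                 return True
--             seen.add(y)
--     # only four-number combination possible under a max roll of 12
--     if rollTotal == 10 and {1, 2, 3, 4} <= set(nums):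
--         return True
--     return False
-- ===== Notes on version B (the rewrite author's own statement) =====
-- stated objective: faster
-- what changed: Replaced A's O(n^3) nested index loops over pairs and triples with hash-set two-sum passes: a single seen-set pass for pairs, and for triples one outer loop fixing the first element with a two-sum pass over the suffix.
import Mathlib
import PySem

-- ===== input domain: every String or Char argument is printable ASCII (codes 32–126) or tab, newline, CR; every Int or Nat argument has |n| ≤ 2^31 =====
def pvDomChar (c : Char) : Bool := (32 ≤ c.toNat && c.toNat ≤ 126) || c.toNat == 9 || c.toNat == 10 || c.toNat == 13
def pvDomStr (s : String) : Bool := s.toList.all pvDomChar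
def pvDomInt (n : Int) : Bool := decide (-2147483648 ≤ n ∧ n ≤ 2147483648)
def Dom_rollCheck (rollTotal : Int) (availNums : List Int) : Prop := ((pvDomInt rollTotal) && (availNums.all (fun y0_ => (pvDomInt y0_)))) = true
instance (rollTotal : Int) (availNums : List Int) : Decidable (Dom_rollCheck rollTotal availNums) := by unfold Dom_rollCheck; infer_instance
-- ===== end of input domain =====

-- B replaces A's O(n^3) nested index loops with seen-set two-sum passes (O(n^2)); return value proved equal everywhere.

-- ===== PORT A =====
-- A's pair loop: for index1 in range(n): for index2 in range(index1+1, n): …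
def pairLoopA (rollTotal : Int) (xs : List Int) : Bool :=
  (List.range xs.length).any fun index1 =>
    (List.range' (index1 + 1) (xs.length - (index1 + 1))).any fun index2 =>
      xs.getD index1 0 + xs.getD index2 0 == rollTotal

-- A's triple loop
def tripleLoopA (rollTotal : Int) (xs : List Int) : Bool :=
  (List.range xs.length).any fun index1 =>
    (List.range' (index1 + 1) (xs.length - (index1 + 1))).any fun index2 =>
      (List.range' (index2 + 1) (xs.length - (index2 + 1))).any fun index3 =>
        xs.getD index1 0 + xs.getD index2 0 + xs.getD index3 0 == rollTotal

def rollCheck (rollTotal : Int) (availNums : List Int) : Bool :=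
  let xs := availNums.filter (fun x => x ≤ rollTotal)
  let numsLen := xs.length
  if xs.contains rollTotal then true
  else if decide (2 ≤ numsLen) && pairLoopA rollTotal xs then true
  else if decide (3 ≤ numsLen) && tripleLoopA rollTotal xs then true
  else if rollTotal == 10 && (([1, 2, 3, 4] : List Int).all fun x => xs.contains x) then true
  else false

-- ===== PORT B =====
-- B's two-sum pass: 'for y in l: if t - y in seen: return True; seen.add(y)'
def twoSumSeen (t : Int) : List Int → PySem.Set Int → Bool
  | [], _ => false
  | y :: rest, seen =>
    if PySem.Set.contains seen (t - y) then true
    else twoSumSeen t rest (PySem.Set.add seen y)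

def rollCheck_alt (rollTotal : Int) (availNums : List Int) : Bool :=
  let nums := availNums.filter (fun x => x ≤ rollTotal)
  if PySem.Set.contains (PySem.Set.ofList nums) rollTotal then true
  else if twoSumSeen rollTotal nums PySem.Set.empty then true
  else if (List.range nums.length).any (fun i =>
      twoSumSeen (rollTotal - nums.getD i 0) (nums.drop (i + 1)) PySem.Set.empty) then true
  else if rollTotal == 10 &&
      PySem.Set.issubset (PySem.Set.ofList [1, 2, 3, 4]) (PySem.Set.ofList nums) then true
  else false

-- ===== PRECONDITION & SPEC =====
def Spec_rollCheck (rollTotal : Int) (availNums : List Int) (out : Bool) : Prop := out = rollCheck_alt rollTotal availNums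
instance (rollTotal : Int) (availNums : List Int) (out : Bool) : Decidable (Spec_rollCheck rollTotal availNums out) := by unfold Spec_rollCheck; infer_instance

-- ===== CLAIM (what is proved, stated in full; the proofs are below) =====
def Claim_equal_rollCheck : Prop := ∀ (rollTotal : Int) (availNums : List Int), Dom_rollCheck rollTotal availNums → Spec_rollCheck rollTotal availNums (rollCheck rollTotal availNums)

-- ===== LEMMAS AND PROOFS =====

theorem getD_drop_int (l : List Int) (m k : Nat) :
    (l.drop m).getD k 0 = l.getD (m + k) 0 := by
  simp [List.getD_eq_getElem?_getD, List.getElem?_drop]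

-- invariant of the seen-set two-sum pass
theorem twoSumSeen_iff (t : Int) (l : List Int) (s : PySem.Set Int) :
    twoSumSeen t l s = true ↔
      ∃ j, j < l.length ∧
        ((t - l.getD j 0) ∈ s ∨ ∃ i, i < j ∧ l.getD i 0 + l.getD j 0 = t) := by
  induction l generalizing s with
  | nil => simp [twoSumSeen]
  | cons y rest ih =>
    by_cases hy : (t - y) ∈ s
    · simp only [twoSumSeen]
      rw [if_pos (by simpa [PySem.Set.contains_iff] using hy)]
      constructor
      · intro _
        exact ⟨0, by simp, Or.inl (by simpa using hy)⟩
      · intro _; rfl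
    · simp only [twoSumSeen]
      rw [if_neg (by simpa [PySem.Set.contains_iff] using hy)]
      rw [ih]
      constructor
      · rintro ⟨j, hj, h⟩
        refine ⟨j + 1, by simpa using Nat.succ_lt_succ hj, ?_⟩
        rcases h with hmem | ⟨i, hi, hsum⟩
        · rw [PySem.Set.mem_add] at hmem
          rcases hmem with hmem | hmem
          · exact Or.inl (by simpa using hmem)
          · exact Or.inr ⟨0, Nat.succ_pos _, by
              simp only [List.getD_cons_zero, List.getD_cons_succ]; omega⟩
        · exact Or.inr ⟨i + 1, Nat.succ_lt_succ hi, by simpa using hsum⟩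
      · rintro ⟨j, hj, h⟩
        cases j with
        | zero =>
          rcases h with hmem | ⟨i, hi, _⟩
          · exact absurd (by simpa using hmem) hy
          · omega
        | succ j' =>
          refine ⟨j', by simp only [List.length_cons] at hj; omega, ?_⟩
          rcases h with hmem | ⟨i, hi, hsum⟩
          · exact Or.inl (by rw [PySem.Set.mem_add]; left; simpa using hmem)
          · cases i with
            | zero =>
              refine Or.inl ?_
              rw [PySem.Set.mem_add]
              right
              simp only [List.getD_cons_zero, List.getD_cons_succ] at hsum
              omega
            | succ i' =>
              exact Or.inr ⟨i', by omega, by simpa using hsum⟩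

-- condition 1: membership
theorem cond1_eq (t : Int) (xs : List Int) :
    xs.contains t = PySem.Set.contains (PySem.Set.ofList xs) t := by
  rw [Bool.eq_iff_iff]
  simp [PySem.Set.mem_ofList]

-- condition 2: A's pair loop (with its redundant length guard) = B's two-sum pass
theorem cond2_eq (t : Int) (xs : List Int) :
    (decide (2 ≤ xs.length) && pairLoopA t xs) = twoSumSeen t xs PySem.Set.empty := by
  rw [Bool.eq_iff_iff]
  rw [twoSumSeen_iff]
  simp only [Bool.and_eq_true, decide_eq_true_eq, pairLoopA, List.any_eq_true,
    List.mem_range, List.mem_range'_1, beq_iff_eq]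
  constructor
  · rintro ⟨-, i, hi, j, ⟨hj1, hj2⟩, hsum⟩
    exact ⟨j, by omega, Or.inr ⟨i, by omega, hsum⟩⟩
  · rintro ⟨j, hj, h⟩
    rcases h with hmem | ⟨i, hi, hsum⟩
    · simp [PySem.Set.empty] at hmem
    · exact ⟨by omega, i, by omega, j, ⟨by omega, by omega⟩, hsum⟩

-- condition 3: A's triple loop = B's outer loop of two-sum passes on suffixes
theorem cond3_eq (t : Int) (xs : List Int) :
    (decide (3 ≤ xs.length) && tripleLoopA t xs) =
      (List.range xs.length).any (fun i =>
        twoSumSeen (t - xs.getD i 0) (xs.drop (i + 1)) PySem.Set.empty) := by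
  rw [Bool.eq_iff_iff]
  simp only [Bool.and_eq_true, decide_eq_true_eq, tripleLoopA, List.any_eq_true,
    List.mem_range, List.mem_range'_1, beq_iff_eq]
  constructor
  · rintro ⟨-, i, hi, j, ⟨hj1, hj2⟩, k, ⟨hk1, hk2⟩, hsum⟩
    refine ⟨i, hi, ?_⟩
    rw [twoSumSeen_iff]
    refine ⟨k - (i + 1), by simp; omega, Or.inr ⟨j - (i + 1), by omega, ?_⟩⟩
    rw [getD_drop_int, getD_drop_int]
    have hj' : i + 1 + (j - (i + 1)) = j := by omega
    have hk' : i + 1 + (k - (i + 1)) = k := by omega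
    rw [hj', hk']
    omega
  · rintro ⟨i, hi, h⟩
    rw [twoSumSeen_iff] at h
    rcases h with ⟨j, hj, h⟩
    simp only [List.length_drop] at hj
    rcases h with hmem | ⟨i', hi', hsum⟩
    · simp [PySem.Set.empty] at hmem
    · rw [getD_drop_int, getD_drop_int] at hsum
      refine ⟨by omega, i, hi, i + 1 + i', ⟨by omega, by omega⟩,
        i + 1 + j, ⟨by omega, by omega⟩, by omega⟩

-- condition 4: 'all x in [1,2,3,4] in xs' = subset test on the sets
theorem cond4_eq (xs : List Int) :
    (([1, 2, 3, 4] : List Int).all fun x => xs.contains x) =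
      PySem.Set.issubset (PySem.Set.ofList [1, 2, 3, 4]) (PySem.Set.ofList xs) := by
  rw [Bool.eq_iff_iff]
  simp only [List.all_eq_true, PySem.Set.issubset_iff, PySem.Set.mem_ofList]
  constructor
  · intro h x hx; simpa [PySem.Set.mem_ofList] using h x (by simpa [PySem.Set.mem_ofList] using hx)
  · intro h x hx; simpa [PySem.Set.mem_ofList] using h x (by simpa [PySem.Set.mem_ofList] using hx)

-- ===== VERDICT (by name: the statement is the Claim_ definition above) =====
theorem rollCheck_spec : Claim_equal_rollCheck := by
  intro rollTotal availNums _
  unfold Spec_rollCheck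
  simp only [rollCheck, rollCheck_alt]
  rw [cond1_eq, cond2_eq, cond3_eq, cond4_eq]
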